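-- pv_equiv track=rewrite | github.com/patelshraddha/stringprocessing | string_processor/count.py | count_small_datasets
-- ===== SOURCE A (Python) =====
-- from typing import List, Dict
-- from collections import Counter
--
-- def count_small_datasets(scrambled_strings: List[str], long_strings: List[str]) -> List[int]:
--     """ Returns a count of words in a dictionary present in long strings in a scrambled format or not
--         This function implements the matching algorithm in a simpler way via looping
--         through long strings, through dictionary words
--         and matching the frequency map at each position in the long string
--     """
--     output = []
--     for long_string in long_strings:
--         counter = 0
--         max_idx = len(long_string)
--         for scrambled_string in scrambled_strings:
--             len_substr = len(scrambled_string)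
--             scrambled_string_map = Counter(scrambled_string[1:len(scrambled_string)-1])
--             for idx, letter in enumerate(long_string):
--                 if idx == 0:
--                     long_string_map = Counter(long_string[idx + 1:min(len_substr - 1, max_idx)])
--                 else:
--                     long_string_map[letter]-=1
--                     if long_string_map[letter] <= 0:
--                         # Counter equality doesn't work if the count of an element is 0
--                         del long_string_map[letter]
--                     last_idx = idx + len_substr - 2
--                     if last_idx < max_idx and len_substr > 2:
--                         long_string_map[long_string[last_idx]] += 1
--                 # check if the first and last character is the same
--                 # and the frequency of the middle letters is the same
--                 if (scrambled_string[0] == long_string[idx] and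
--                     idx + len_substr - 1 < max_idx and
--                     scrambled_string[-1] == long_string[idx + len_substr - 1] and
--                     scrambled_string_map == long_string_map):
--                     counter += 1
--                     # stop matching if the substring is found
--                     break
--         output.append(counter)
--     return output
-- ===== SOURCE B (Python) =====
-- def count_small_datasets(scrambled_strings, long_strings):
--     """Same result as A: per long string, how many dictionary words occur as a
--     'scrambled substring' (same first char, same last char, middle is an anagram).
--     Instead of re-scanning every long string for every word, build one set of
--     window signatures (length, first, last, sorted middle) per long string and
--     look each word's signature up in it."""
--     word_sigs = [(len(w), w[0], w[-1], ''.join(sorted(w[1:len(w) - 1])))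
--                  for w in scrambled_strings]
--     lengths = set(ws[0] for ws in word_sigs)
--     output = []
--     for s in long_strings:
--         n = len(s)
--         window_sigs = set()
--         for L in lengths:
--             window_sigs.update((L, s[i], s[i + L - 1], ''.join(sorted(s[i + 1:i + L - 1])))
--                                for i in range(n - L + 1))
--         output.append(sum(1 for ws in word_sigs if ws in window_sigs))
--     return output
-- ===== Notes on version B (the rewrite author's own statement) =====
-- stated objective: faster
-- what changed: Instead of re-scanning every long string once per dictionary word with an incrementally maintained Counter, B builds per long string one hash set of window signatures (length, first char, last char, sorted middle) for each distinct word length and answers every word by a single signature lookup.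
-- outside the precondition, e.g. on count_small_datasets([''], ['']): A returns [0], B raises IndexError; on count_small_datasets([''], []): A returns [], B raises IndexError
import Mathlib
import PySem

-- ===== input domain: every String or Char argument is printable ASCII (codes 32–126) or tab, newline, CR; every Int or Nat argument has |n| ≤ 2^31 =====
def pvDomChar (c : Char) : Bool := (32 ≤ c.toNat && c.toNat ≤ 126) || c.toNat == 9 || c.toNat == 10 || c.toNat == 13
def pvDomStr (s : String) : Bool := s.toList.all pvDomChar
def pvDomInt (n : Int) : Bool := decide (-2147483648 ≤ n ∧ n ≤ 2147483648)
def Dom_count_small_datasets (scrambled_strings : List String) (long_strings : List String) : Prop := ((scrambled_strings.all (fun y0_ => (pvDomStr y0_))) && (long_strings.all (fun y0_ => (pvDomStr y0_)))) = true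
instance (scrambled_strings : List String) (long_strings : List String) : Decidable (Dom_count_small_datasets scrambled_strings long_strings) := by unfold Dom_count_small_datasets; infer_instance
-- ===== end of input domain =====

-- B replaces A's per-word rescans of every long string by one set of window signatures
-- (length, first char, last char, sorted middle) per long string, looked up once per word (objective: faster).

-- ===== PORT A =====
-- Python 3 Counter/dict equality `==` compares the count of every key of either side
-- (order-insensitive); exact here.
def pyCounterEq (d1 d2 : PySem.Dict Char Int) : Bool :=
  d1.keys.all (fun k => d1.getD k 0 == d2.getD k 0) &&
  d2.keys.all (fun k => d1.getD k 0 == d2.getD k 0)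

-- body of A's `for idx, letter in enumerate(long_string)` iteration that maintains `long_string_map`
def aStep (w s : List Char) (idx : Int) (letter : Char) (m : PySem.Dict Char Int) :
    PySem.Dict Char Int :=
  if idx = 0 then
    PySem.Dict.counter (PySem.List.slice s (some (idx + 1)) (some (min ((w.length : Int) - 1) (s.length : Int))))
  else
    let m1 := m.modify letter 0 (· - 1)
    let m2 := if m1.getD letter 0 ≤ 0 then m1.erase letter else m1
    let lastIdx := idx + (w.length : Int) - 2
    if lastIdx < (s.length : Int) ∧ 2 < (w.length : Int) then
      m2.modify (PySem.List.pyGetD s lastIdx ' ') 0 (· + 1)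
    else m2

-- A's inner loop with its `break` (returns true = the word was found, counter += 1)
def aScan (w s : List Char) (wmap : PySem.Dict Char Int) :
    List (Int × Char) → PySem.Dict Char Int → Bool
  | [], _ => false
  | (idx, letter) :: rest, m =>
    let m' := aStep w s idx letter m
    if (PySem.List.pyGetD w 0 ' ' == letter) &&
       decide (idx + (w.length : Int) - 1 < (s.length : Int)) &&
       (PySem.List.pyGetD w (-1) ' ' == PySem.List.pyGetD s (idx + (w.length : Int) - 1) ' ') &&
       pyCounterEq wmap m'
    then true
    else aScan w s wmap rest m'

def aWordMatch (w s : List Char) : Bool :=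
  aScan w s (PySem.Dict.counter (PySem.List.slice w (some 1) (some ((w.length : Int) - 1))))
    (PySem.List.enumerate s) PySem.Dict.empty

def count_small_datasets (scrambled_strings : List String) (long_strings : List String) : List Int :=
  long_strings.foldl (fun output l =>
    output ++ [scrambled_strings.foldl
      (fun counter w => if aWordMatch w.toList l.toList then counter + 1 else counter) 0]) []

-- ===== PORT B =====
-- signature of a dictionary word: (len(w), w[0], w[-1], sorted(w[1:len(w)-1]))
def bSigOf (w : List Char) : Int × Char × Char × List Char :=
  ((w.length : Int), PySem.List.pyGetD w 0 ' ', PySem.List.pyGetD w (-1) ' ',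
   PySem.List.sorted (PySem.List.slice w (some 1) (some ((w.length : Int) - 1))) (fun c => c) false)

-- signature of the window of length L starting at i in the long string s
def bWindowSig (s : List Char) (L : Int) (i : Int) : Int × Char × Char × List Char :=
  (L, PySem.List.pyGetD s i ' ', PySem.List.pyGetD s (i + L - 1) ' ',
   PySem.List.sorted (PySem.List.slice s (some (i + 1)) (some (i + L - 1))) (fun c => c) false)

def count_small_datasets_alt (scrambled_strings : List String) (long_strings : List String) : List Int :=
  let wordSigs := scrambled_strings.map (fun w => bSigOf w.toList)
  let lengths : PySem.Set Int := PySem.Set.ofList (wordSigs.map (·.1))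
  long_strings.foldl (fun output sStr =>
    let s := sStr.toList
    let n : Int := s.length
    let windowSigs : PySem.Set (Int × Char × Char × List Char) :=
      lengths.foldl (fun acc L =>
        PySem.Set.update acc ((PySem.List.pyRange 0 (n - L + 1)).map (fun i => bWindowSig s L i)))
        PySem.Set.empty
    output ++ [(wordSigs.map (fun ws => if PySem.Set.contains windowSigs ws then (1 : Int) else 0)).sum]) []

-- ===== PRECONDITION & SPEC =====
-- Pre_ excludes inputs containing an empty dictionary word: on those A raises IndexError
-- (`scrambled_string[0]`) whenever any long string is nonempty, and returns only in the
-- degenerate all-long-strings-empty case (where B raises).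
def Pre_count_small_datasets (scrambled_strings : List String) (long_strings : List String) : Prop :=
  ∀ w ∈ scrambled_strings, w ≠ ""
instance (scrambled_strings : List String) (long_strings : List String) : Decidable (Pre_count_small_datasets scrambled_strings long_strings) := by unfold Pre_count_small_datasets; infer_instance
def pvWitness_count_small_datasets : List String × List String := (["ab", "ba", "xyz"], ["cabd", ""])

def Spec_count_small_datasets (scrambled_strings : List String) (long_strings : List String) (out : List Int) : Prop := out = count_small_datasets_alt scrambled_strings long_strings
instance (scrambled_strings : List String) (long_strings : List String) (out : List Int) : Decidable (Spec_count_small_datasets scrambled_strings long_strings out) := by unfold Spec_count_small_datasets; infer_instance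

-- ===== CLAIM (what is proved, stated in full; the proofs are below) =====
def Claim_equal_count_small_datasets : Prop := ∀ (scrambled_strings : List String) (long_strings : List String), Dom_count_small_datasets scrambled_strings long_strings → Pre_count_small_datasets scrambled_strings long_strings → Spec_count_small_datasets scrambled_strings long_strings (count_small_datasets scrambled_strings long_strings)

-- ===== LEMMAS AND PROOFS =====

-- Python slice xs[a:b] for Nat bounds, used for reasoning
def sliceN (xs : List Char) (a b : Nat) : List Char := (xs.drop a).take (b - a)
-- the window A's `long_string_map` describes after processing index j
def winL (w s : List Char) (j : Nat) : List Char := sliceN s (j + 1) (min (j + w.length - 1) s.length)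
def midW (w : List Char) : List Char := sliceN w 1 (w.length - 1)
-- the common "scrambled match at position j" condition
def CondAt (w s : List Char) (j : Nat) : Prop :=
  j + w.length ≤ s.length ∧ s.getD j ' ' = w.getD 0 ' ' ∧
  s.getD (j + w.length - 1) ' ' = w.getD (w.length - 1) ' ' ∧
  (sliceN s (j + 1) (j + w.length - 1)).Perm (midW w)
def MatchesP (w s : List Char) : Prop := ∃ j, CondAt w s j

-- enumerate with a Nat start, for induction
def myEnum (i : Nat) : List Char → List (Int × Char)
  | [] => []
  | c :: t => ((i : Int), c) :: myEnum (i + 1) t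

theorem enumerate_eq_myEnum (xs : List Char) : ∀ (k : Nat), PySem.List.enumerate xs (k : Int) = myEnum k xs := by
  induction xs with
  | nil => intro k; simp [PySem.List.enumerate, myEnum]
  | cons c t ih =>
    intro k
    rw [PySem.List.enumerate_cons]
    have h : (k : Int) + 1 = ((k + 1 : Nat) : Int) := by push_cast; ring
    rw [h, ih (k + 1)]
    rfl

theorem find?_filter_key (k k' : Char) (l : List (Char × Int)) :
    List.find? (fun p => p.1 == k') (l.filter (fun p => !(p.1 == k))) =
    (if k' = k then none else List.find? (fun p => p.1 == k') l) := by
  induction l with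
  | nil => split <;> simp
  | cons p t ih =>
    by_cases hk : p.1 = k
    · rw [List.filter_cons_of_neg (by simp [hk])]
      rw [ih]
      split
      · rfl
      · rename_i hne
        rw [List.find?_cons_of_neg]
        simp only [beq_iff_eq]
        exact fun h => hne (by rw [← h, hk])
    · rw [List.filter_cons_of_pos (by simp [hk])]
      by_cases hk' : p.1 = k'
      · rw [List.find?_cons_of_pos (by simp [hk']), List.find?_cons_of_pos (by simp [hk'])]
        split
        · rename_i he; exact absurd (he ▸ hk') hk
        · rfl
      · rw [List.find?_cons_of_neg (by simp [hk']), List.find?_cons_of_neg (by simp [hk']), ih]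

theorem getD_erase (d : PySem.Dict Char Int) (k k' : Char) :
    (d.erase k).getD k' 0 = if k' = k then 0 else d.getD k' 0 := by
  rw [PySem.Dict.getD_eq_get?_getD, PySem.Dict.getD_eq_get?_getD]
  show ((PySem.Dict.mk (d.items.filter (fun p => !(p.1 == k)))).get? k').getD 0 = _
  simp only [PySem.Dict.get?]
  rw [find?_filter_key]
  split <;> rfl

theorem pyCounterEq_iff (d1 d2 : PySem.Dict Char Int) :
    pyCounterEq d1 d2 = true ↔ ∀ c, d1.getD c 0 = d2.getD c 0 := by
  unfold pyCounterEq
  simp only [Bool.and_eq_true, List.all_eq_true, beq_iff_eq]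
  constructor
  · rintro ⟨h1, h2⟩ c
    by_cases hc1 : c ∈ d1.keys
    · exact h1 c hc1
    by_cases hc2 : c ∈ d2.keys
    · exact h2 c hc2
    · rw [PySem.Dict.getD_of_not_contains d1 0 (by
        rw [← Bool.not_eq_true, PySem.Dict.contains_iff_mem_keys]; exact hc1),
        PySem.Dict.getD_of_not_contains d2 0 (by
        rw [← Bool.not_eq_true, PySem.Dict.contains_iff_mem_keys]; exact hc2)]
  · intro h; exact ⟨fun c _ => h c, fun c _ => h c⟩

theorem pyGetD_neg_one (xs : List Char) (h : xs ≠ []) (d : Char) :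
    PySem.List.pyGetD xs (-1) d = xs.getD (xs.length - 1) d := by
  have hn : 0 < xs.length := List.length_pos_iff.mpr h
  have h1 : -(xs.length : Int) ≤ -1 := by omega
  simp [PySem.List.pyGetD, PySem.List.pyGet?, PySem.List.pyIdx?, h1, List.getD_eq_getElem?_getD]

theorem slice_cast (xs : List Char) (a b : Nat) :
    PySem.List.slice xs (some (a : Int)) (some (b : Int)) = sliceN xs a b := by
  rw [PySem.List.slice_natCast]; rfl

theorem sliceN_cons (s : List Char) (a b : Nat) (ha : a < s.length) (hab : a < b) :
    sliceN s a b = s.getD a ' ' :: sliceN s (a + 1) b := by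
  unfold sliceN
  rw [← List.getElem_cons_drop ha]
  have h : b - a = (b - (a + 1)) + 1 := by omega
  rw [h, List.take_succ_cons, List.getD_eq_getElem s ' ' ha]

theorem sliceN_snoc (s : List Char) (a b : Nat) (hb : b < s.length) (hab : a ≤ b) :
    sliceN s a (b + 1) = sliceN s a b ++ [s.getD b ' '] := by
  unfold sliceN
  have h : b + 1 - a = (b - a) + 1 := by omega
  rw [h, List.take_add_one]
  congr 1
  have hlt : b - a < (s.drop a).length := by simp; omega
  rw [List.getElem?_eq_getElem hlt]
  have he : (s.drop a)[b - a] = s.getD b ' ' := by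
    rw [List.getElem_drop, List.getD_eq_getElem s ' ' hb]
    congr 1
    omega
  rw [he]
  rfl

theorem sliceN_empty (s : List Char) (a b : Nat) (h : b ≤ a) : sliceN s a b = [] := by
  unfold sliceN
  rw [Nat.sub_eq_zero_of_le h, List.take_zero]

theorem step_inv (w s : List Char) (hw : 1 ≤ w.length) (idx : Nat) (h1 : 1 ≤ idx)
    (hn : idx < s.length) (m : PySem.Dict Char Int)
    (hm : ∀ c, m.getD c 0 = ((winL w s (idx - 1)).count c : Int)) :
    ∀ c, (aStep w s (idx : Int) (s.getD idx ' ') m).getD c 0 = ((winL w s idx).count c : Int) := by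
  intro c
  have hidx0 : ((idx : Int)) ≠ 0 := by omega
  unfold aStep
  rw [if_neg hidx0]
  simp only []
  set letter := s.getD idx ' ' with hletter
  -- the previous window starts with `letter`
  have hprev : winL w s (idx - 1) = sliceN s idx (min (idx + w.length - 2) s.length) := by
    unfold winL
    congr 1 <;> omega
  by_cases hL : 2 < w.length
  · -- real window: previous window = letter :: Mid
    have hmid : sliceN s idx (min (idx + w.length - 2) s.length)
        = letter :: sliceN s (idx + 1) (min (idx + w.length - 2) s.length) := by
      apply sliceN_cons s idx _ hn
      omega
    have hm2 : ∀ ch, ((if (m.modify letter 0 (· - 1)).getD letter 0 ≤ 0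
          then (m.modify letter 0 (· - 1)).erase letter
          else m.modify letter 0 (· - 1)).getD ch 0)
        = ((sliceN s (idx + 1) (min (idx + w.length - 2) s.length)).count ch : Int) := by
      intro ch
      have hml : (m.modify letter 0 (· - 1)).getD letter 0
          = ((sliceN s (idx + 1) (min (idx + w.length - 2) s.length)).count letter : Int) := by
        rw [PySem.Dict.getD_modify, if_pos rfl, hm letter, hprev, hmid]
        simp [List.count_cons_self]
      split
      · rename_i hle
        rw [getD_erase]
        split
        · rename_i he
          rw [he] at *
          omega
        · rename_i hne
          rw [PySem.Dict.getD_modify, if_neg hne, hm ch, hprev, hmid]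
          rw [List.count_cons_of_ne (by exact fun h => hne h.symm)]
      · rename_i hgt
        by_cases hch : ch = letter
        · rw [hch, hml]
        · rw [PySem.Dict.getD_modify, if_neg hch, hm ch, hprev, hmid]
          rw [List.count_cons_of_ne (by exact fun h => hch h.symm)]
    by_cases hg : idx + w.length - 2 < s.length
    · -- window still fully inside: guard true, append the new last char
      rw [if_pos (by constructor <;> omega)]
      have hcast : (idx : Int) + (w.length : Int) - 2 = ((idx + w.length - 2 : Nat) : Int) := by omega
      rw [hcast, PySem.List.pyGetD_natCast]
      rw [PySem.Dict.getD_modify]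
      have hwin : winL w s idx
          = sliceN s (idx + 1) (idx + w.length - 2) ++ [s.getD (idx + w.length - 2) ' '] := by
        unfold winL
        have h1 : min (idx + w.length - 1) s.length = (idx + w.length - 2) + 1 := by omega
        rw [h1]
        exact sliceN_snoc s (idx + 1) (idx + w.length - 2) hg (by omega)
      have hminmid : min (idx + w.length - 2) s.length = idx + w.length - 2 := by omega
      rw [hwin]
      split
      · rename_i he
        rw [hm2 (s.getD (idx + w.length - 2) ' '), hminmid, he]
        simp [List.count_append]
      · rename_i hne
        rw [hm2 c, hminmid, List.count_append]
        simp [List.count_cons]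
        intro h
        exact absurd (by rw [← h, List.getD_eq_getElem?_getD]) hne
    · -- window truncated at the right end: guard false, nothing appended
      rw [if_neg (by intro hcon; omega)]
      have hwin : winL w s idx = sliceN s (idx + 1) (min (idx + w.length - 2) s.length) := by
        unfold winL
        congr 1
        omega
      rw [hwin]
      exact hm2 c
  · -- len(word) ≤ 2: both windows are empty
    rw [if_neg (by intro hcon; omega)]
    have hz : ∀ ch, m.getD ch 0 = 0 := by
      intro ch
      rw [hm ch, hprev, sliceN_empty s _ _ (by omega)]
      simp
    have hneg : (m.modify letter 0 (· - 1)).getD letter 0 ≤ 0 := by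
      rw [PySem.Dict.getD_modify, if_pos rfl, hz letter]
      omega
    rw [if_pos hneg, getD_erase]
    have hwin : winL w s idx = [] := by
      unfold winL
      exact sliceN_empty s _ _ (by omega)
    rw [hwin]
    split
    · simp
    · rename_i hne
      rw [PySem.Dict.getD_modify, if_neg hne, hz c]
      simp

theorem step_zero (w s : List Char) (hw : 1 ≤ w.length) (m : PySem.Dict Char Int) :
    ∀ c, (aStep w s 0 (s.getD 0 ' ') m).getD c 0 = ((winL w s 0).count c : Int) := by
  intro c
  unfold aStep
  rw [if_pos rfl]
  have e1 : (0 : Int) + 1 = ((1 : Nat) : Int) := by norm_num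
  have e2 : min ((w.length : Int) - 1) (s.length : Int) = ((min (w.length - 1) s.length : Nat) : Int) := by
    omega
  rw [e1, e2, slice_cast, PySem.Dict.getD_counter]
  unfold winL
  have h4 : 0 + w.length - 1 = w.length - 1 := by omega
  rw [h4]

theorem cond_bool_iff (w s : List Char) (hw : w ≠ []) (idx : Nat) (m' : PySem.Dict Char Int)
    (hm : ∀ c, m'.getD c 0 = ((winL w s idx).count c : Int)) :
    ((PySem.List.pyGetD w 0 ' ' == s.getD idx ' ') &&
       decide ((idx : Int) + (w.length : Int) - 1 < (s.length : Int)) &&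
       (PySem.List.pyGetD w (-1) ' ' == PySem.List.pyGetD s ((idx : Int) + (w.length : Int) - 1) ' ') &&
       pyCounterEq (PySem.Dict.counter (PySem.List.slice w (some 1) (some ((w.length : Int) - 1)))) m') = true
    ↔ CondAt w s idx := by
  have hw1 : 1 ≤ w.length := List.length_pos_iff.mpr hw
  have e0 : (0 : Int) = ((0 : Nat) : Int) := rfl
  have e1 : (1 : Int) = ((1 : Nat) : Int) := rfl
  have ew : (w.length : Int) - 1 = ((w.length - 1 : Nat) : Int) := by omega
  have ewslice : PySem.List.slice w (some 1) (some ((w.length : Int) - 1)) = midW w := by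
    rw [ew, e1, slice_cast]; rfl
  simp only [Bool.and_eq_true, beq_iff_eq, decide_eq_true_eq]
  constructor
  · rintro ⟨⟨⟨h1, h2⟩, h3⟩, h4⟩
    have hle : idx + w.length ≤ s.length := by omega
    have ei : (idx : Int) + (w.length : Int) - 1 = ((idx + w.length - 1 : Nat) : Int) := by omega
    refine ⟨hle, ?_, ?_, ?_⟩
    · rw [e0, PySem.List.pyGetD_natCast] at h1
      exact h1.symm
    · rw [pyGetD_neg_one w hw, ei, PySem.List.pyGetD_natCast] at h3
      exact h3.symm
    · rw [ewslice, pyCounterEq_iff] at h4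
      rw [List.perm_iff_count]
      intro a
      have := h4 a
      rw [PySem.Dict.getD_counter, hm a] at this
      have hmin : min (idx + w.length - 1) s.length = idx + w.length - 1 := by omega
      rw [← hmin]
      exact_mod_cast this.symm
  · rintro ⟨hle, h1, h2, h3⟩
    have ei : (idx : Int) + (w.length : Int) - 1 = ((idx + w.length - 1 : Nat) : Int) := by omega
    refine ⟨⟨⟨?_, by omega⟩, ?_⟩, ?_⟩
    · rw [e0, PySem.List.pyGetD_natCast]
      exact h1.symm
    · rw [pyGetD_neg_one w hw, ei, PySem.List.pyGetD_natCast]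
      exact h2.symm
    · rw [ewslice, pyCounterEq_iff]
      intro a
      rw [PySem.Dict.getD_counter, hm a]
      have hmin : min (idx + w.length - 1) s.length = idx + w.length - 1 := by omega
      unfold winL
      rw [hmin]
      have := (List.perm_iff_count.mp h3) a
      exact_mod_cast this.symm

theorem scan_spec (w s : List Char) (hw : w ≠ []) :
    ∀ (xs : List Char) (idx : Nat) (m : PySem.Dict Char Int), xs = s.drop idx →
      (idx = 0 ∨ (1 ≤ idx ∧ ∀ c, m.getD c 0 = ((winL w s (idx - 1)).count c : Int))) →
      (aScan w s (PySem.Dict.counter (PySem.List.slice w (some 1) (some ((w.length : Int) - 1))))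
          (myEnum idx xs) m = true ↔ ∃ j, idx ≤ j ∧ CondAt w s j) := by
  have hw1 : 1 ≤ w.length := List.length_pos_iff.mpr hw
  intro xs
  induction xs with
  | nil =>
    intro idx m hxs _
    simp only [myEnum, aScan]
    constructor
    · intro h; exact absurd h (by simp)
    · rintro ⟨j, hj, hcond⟩
      have hlen : s.length ≤ idx := by
        by_contra hlt
        rw [not_le] at hlt
        have : s.drop idx ≠ [] := by
          intro hnil
          have := List.drop_eq_nil_iff.mp hnil
          omega
        exact this hxs.symm
      have := hcond.1
      omega
  | cons c t ih =>
    intro idx m hxs hinv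
    have hidx : idx < s.length := by
      by_contra hge
      rw [not_lt] at hge
      rw [List.drop_eq_nil_iff.mpr hge] at hxs
      exact List.cons_ne_nil c t hxs
    have hc : c = s.getD idx ' ' := by
      have := List.getElem_cons_drop hidx
      rw [← hxs] at this
      have h2 := congrArg (fun l => l.headD ' ') this
      simp at h2
      rw [List.getD_eq_getElem?_getD]
      exact h2.symm
    have ht : t = s.drop (idx + 1) := by
      have := List.getElem_cons_drop hidx
      rw [← hxs] at this
      have h2 := congrArg List.tail this
      simpa using h2.symm
    simp only [myEnum, aScan]
    set m' := aStep w s (idx : Int) c m with hm'def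
    have hm' : ∀ ch, m'.getD ch 0 = ((winL w s idx).count ch : Int) := by
      rw [hm'def, hc]
      rcases hinv with h0 | ⟨h1, hm⟩
      · subst h0
        exact step_zero w s hw1 m
      · exact step_inv w s hw1 idx h1 hidx m hm
    rw [hc]
    have hcond := cond_bool_iff w s hw idx m' hm'
    by_cases hb : ((PySem.List.pyGetD w 0 ' ' == s.getD idx ' ') &&
       decide ((idx : Int) + (w.length : Int) - 1 < (s.length : Int)) &&
       (PySem.List.pyGetD w (-1) ' ' == PySem.List.pyGetD s ((idx : Int) + (w.length : Int) - 1) ' ') &&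
       pyCounterEq (PySem.Dict.counter (PySem.List.slice w (some 1) (some ((w.length : Int) - 1)))) m') = true
    · rw [if_pos hb]
      simp only [true_iff]
      exact ⟨idx, le_refl idx, hcond.mp hb⟩
    · rw [if_neg hb]
      rw [ih (idx + 1) m' ht (Or.inr ⟨by omega, by
        intro ch
        have h5 : idx + 1 - 1 = idx := by omega
        rw [h5]
        exact hm' ch⟩)]
      constructor
      · rintro ⟨j, hj, hco⟩
        exact ⟨j, by omega, hco⟩
      · rintro ⟨j, hj, hco⟩
        rcases Nat.eq_or_lt_of_le hj with rfl | hlt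
        · exact absurd (hcond.mpr hco) hb
        · exact ⟨j, by omega, hco⟩

theorem aWordMatch_iff (w s : List Char) (hw : w ≠ []) :
    aWordMatch w s = true ↔ MatchesP w s := by
  unfold aWordMatch
  have h0 : PySem.List.enumerate s = myEnum 0 s := by
    have := enumerate_eq_myEnum s 0
    simpa using this
  rw [h0, scan_spec w s hw s 0 PySem.Dict.empty (by simp) (Or.inl rfl)]
  unfold MatchesP
  constructor
  · rintro ⟨j, _, hc⟩; exact ⟨j, hc⟩
  · rintro ⟨j, hc⟩; exact ⟨j, Nat.zero_le j, hc⟩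

theorem mem_foldl_update {α : Type} [BEq α] [LawfulBEq α] (Ls : List Int) (g : Int → List α) (x : α) :
    ∀ (init : PySem.Set α),
      (x ∈ Ls.foldl (fun acc L => PySem.Set.update acc (g L)) init ↔ x ∈ init ∨ ∃ L ∈ Ls, x ∈ g L) := by
  induction Ls with
  | nil => intro init; simp
  | cons L t ih =>
    intro init
    rw [List.foldl_cons, ih, PySem.Set.mem_update]
    constructor
    · rintro (⟨h | h⟩ | ⟨L', hL', hx⟩)
      · exact Or.inl h
      · exact Or.inr ⟨L, List.mem_cons_self .., h⟩
      · exact Or.inr ⟨L', List.mem_cons_of_mem _ hL', hx⟩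
    · rintro (h | ⟨L', hL', hx⟩)
      · exact Or.inl (Or.inl h)
      · rcases List.mem_cons.mp hL' with rfl | h'
        · exact Or.inl (Or.inr hx)
        · exact Or.inr ⟨L', h', hx⟩

theorem bSig_mem_iff (ss : List String) (w : String) (hmem : w ∈ ss) (hw : w ≠ "") (s : List Char) :
    (PySem.Set.contains
      ((PySem.Set.ofList ((ss.map (fun v => bSigOf v.toList)).map (·.1))).foldl
        (fun acc L =>
          PySem.Set.update acc ((PySem.List.pyRange 0 ((s.length : Int) - L + 1)).map (fun i => bWindowSig s L i)))
        PySem.Set.empty)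
      (bSigOf w.toList)) = true ↔ MatchesP w.toList s := by
  have hwl : w.toList ≠ [] := fun h => hw (String.toList_eq_nil_iff.mp h)
  have hw1 : 1 ≤ w.toList.length := List.length_pos_iff.mpr hwl
  have ewslice : PySem.List.slice w.toList (some 1) (some ((w.toList.length : Int) - 1))
      = midW w.toList := by
    have ew : (w.toList.length : Int) - 1 = ((w.toList.length - 1 : Nat) : Int) := by omega
    have e1 : (1 : Int) = ((1 : Nat) : Int) := rfl
    rw [ew, e1, slice_cast]; rfl
  rw [PySem.Set.contains_iff,
    mem_foldl_update ((PySem.Set.ofList ((ss.map (fun v => bSigOf v.toList)).map (·.1))))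
      (fun L => (PySem.List.pyRange 0 ((s.length : Int) - L + 1)).map (fun i => bWindowSig s L i))
      (bSigOf w.toList)]
  have hne : (bSigOf w.toList) ∉ (PySem.Set.empty : PySem.Set (Int × Char × Char × List Char)) := by
    simp [PySem.Set.empty]
  constructor
  · rintro (h | ⟨L, _, hx⟩)
    · exact absurd h hne
    rcases List.mem_map.mp hx with ⟨i, hir, hsig⟩
    rcases PySem.List.mem_pyRange_one.mp hir with ⟨hi0, hin⟩
    obtain ⟨j, rfl⟩ : ∃ j : Nat, (j : Int) = i := ⟨i.toNat, by omega⟩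
    unfold bWindowSig bSigOf at hsig
    rw [Prod.mk.injEq, Prod.mk.injEq, Prod.mk.injEq] at hsig
    obtain ⟨hLw, h1, h2, h3⟩ := hsig
    subst hLw
    have hjn : j + w.toList.length ≤ s.length := by omega
    refine ⟨j, hjn, ?_, ?_, ?_⟩
    · rw [PySem.List.pyGetD_natCast] at h1
      have e0 : (0 : Int) = ((0 : Nat) : Int) := rfl
      rw [e0, PySem.List.pyGetD_natCast] at h1
      exact h1
    · have ei : (j : Int) + (w.toList.length : Int) - 1 = ((j + w.toList.length - 1 : Nat) : Int) := by
        omega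
      rw [ei, PySem.List.pyGetD_natCast, pyGetD_neg_one w.toList hwl] at h2
      exact h2
    · have ei1 : (j : Int) + 1 = ((j + 1 : Nat) : Int) := by omega
      have ei2 : (j : Int) + (w.toList.length : Int) - 1 = ((j + w.toList.length - 1 : Nat) : Int) := by
        omega
      rw [ei1, ei2, slice_cast, ewslice] at h3
      have := (PySem.List.sorted_id_eq_sorted_id_iff_perm _ _).mp h3
      exact this
  · rintro ⟨j, hjn, h1, h2, h3⟩
    refine Or.inr ⟨(w.toList.length : Int), ?_, ?_⟩
    · rw [PySem.Set.mem_ofList]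
      exact List.mem_map.mpr ⟨bSigOf w.toList,
        List.mem_map.mpr ⟨w, hmem, rfl⟩, rfl⟩
    · refine List.mem_map.mpr ⟨(j : Int), PySem.List.mem_pyRange_one.mpr ⟨by omega, by omega⟩, ?_⟩
      unfold bWindowSig bSigOf
      rw [Prod.mk.injEq, Prod.mk.injEq, Prod.mk.injEq]
      refine ⟨rfl, ?_, ?_, ?_⟩
      · have e0 : (0 : Int) = ((0 : Nat) : Int) := rfl
        rw [PySem.List.pyGetD_natCast, e0, PySem.List.pyGetD_natCast]
        exact h1
      · have ei : (j : Int) + (w.toList.length : Int) - 1 = ((j + w.toList.length - 1 : Nat) : Int) := by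
          omega
        rw [ei, PySem.List.pyGetD_natCast, pyGetD_neg_one w.toList hwl]
        exact h2
      · have ei1 : (j : Int) + 1 = ((j + 1 : Nat) : Int) := by omega
        have ei2 : (j : Int) + (w.toList.length : Int) - 1 = ((j + w.toList.length - 1 : Nat) : Int) := by
          omega
        rw [ei1, ei2, slice_cast, ewslice]
        exact (PySem.List.sorted_id_eq_sorted_id_iff_perm _ _).mpr h3

-- ===== VERDICT (by name: the statement is the Claim_ definition above) =====
theorem count_small_datasets_spec : Claim_equal_count_small_datasets := by
  unfold Claim_equal_count_small_datasets
  intro ss ls _ hpre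
  unfold Spec_count_small_datasets count_small_datasets count_small_datasets_alt
  simp only []
  rw [PySem.List.foldl_append_singleton_eq_map
      (f := fun l => ss.foldl
        (fun counter w => if aWordMatch w.toList l.toList then counter + 1 else counter) 0) ls [],
    PySem.List.foldl_append_singleton_eq_map
      (f := fun sStr => ((List.map (fun w => bSigOf w.toList) ss).map
        (fun ws =>
          if (List.foldl
              (fun acc L => PySem.Set.update acc
                ((PySem.List.pyRange 0 ((sStr.toList.length : Int) - L + 1)).map
                  (fun i => bWindowSig sStr.toList L i)))
              PySem.Set.empty
              (PySem.Set.ofList ((List.map (fun w => bSigOf w.toList) ss).map (·.1)))).contains ws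
          then (1 : Int) else 0)).sum) ls []]
  simp only [List.nil_append]
  apply List.map_congr_left
  intro l _
  have hA := PySem.List.foldl_if_add_one (fun w => aWordMatch w.toList l.toList) ss 0
  rw [hA]
  rw [PySem.List.sum_map_ite_one_zero]
  rw [List.countP_map, zero_add]
  congr 1
  apply List.countP_congr
  intro w hwmem
  have hw : w ≠ "" := hpre w hwmem
  have hwl : w.toList ≠ [] := fun h => hw (String.toList_eq_nil_iff.mp h)
  exact (aWordMatch_iff w.toList l.toList hwl).trans
    (bSig_mem_iff ss w hwmem hw l.toList).symm
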